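-- pv_equiv track=rewrite | github.com/DonPenetron/hakaton | utils.py | extract_speakers
-- ===== SOURCE A (Python) =====
-- def extract_speakers(result):
--     speakers = set()
--     for item in result:
--         speaker = item["speaker"]
--         if speaker not in speakers:
--             speakers.add(speaker)
--     speakers = sorted(speakers)
--     return speakers
-- ===== SOURCE B (Python) =====
-- def extract_speakers(result):
--     values = sorted(item["speaker"] for item in result)
--     out = []
--     for v in values:
--         if not out or v != out[-1]:
--             out.append(v)
--     return out
-- ===== Notes on version B (the rewrite author's own statement) =====
-- stated objective: alternative
-- what changed: B sorts the full multiset of speaker values first and removes duplicates in one adjacency pass, instead of A's dedup-into-a-set followed by sorting the set.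
import Mathlib
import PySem

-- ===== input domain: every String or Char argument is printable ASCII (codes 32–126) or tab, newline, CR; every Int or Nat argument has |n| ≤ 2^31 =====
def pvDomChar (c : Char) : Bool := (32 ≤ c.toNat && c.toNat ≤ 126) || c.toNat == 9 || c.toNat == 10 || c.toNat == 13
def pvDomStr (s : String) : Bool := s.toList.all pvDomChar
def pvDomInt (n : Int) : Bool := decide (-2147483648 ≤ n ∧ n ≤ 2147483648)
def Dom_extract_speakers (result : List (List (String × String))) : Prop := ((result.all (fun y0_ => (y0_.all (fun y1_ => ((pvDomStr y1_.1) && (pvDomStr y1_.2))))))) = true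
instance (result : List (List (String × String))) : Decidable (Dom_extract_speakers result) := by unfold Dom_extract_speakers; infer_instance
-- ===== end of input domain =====

-- B sorts the full multiset of speaker values first and dedups adjacent duplicates in one pass,
-- instead of A's dedup-into-a-set then sort; same cost class, different traversal.

-- ===== PORT A =====
-- item["speaker"]: first-match association-list lookup, none = KeyError (used by both ports)
def lookup_speaker (item : List (String × String)) : Option String :=
  match item with
  | [] => none
  | (k, v) :: t => if k = "speaker" then some v else lookup_speaker t

-- A's loop: look up item["speaker"], add it to the set if absent.
def extract_speakers_go (items : List (List (String × String))) (speakers : List String) :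
    Option (List String) :=
  match items with
  | [] => some speakers
  | item :: rest =>
    match lookup_speaker item with
    | none => none                                  -- KeyError, excluded by Pre_
    | some sp =>
      extract_speakers_go rest (if sp ∈ speakers then speakers else speakers ++ [sp])

def extract_speakers (result : List (List (String × String))) : List String :=
  match extract_speakers_go result [] with
  | none => []                                      -- unreachable under Pre_ (KeyError in Python)
  | some speakers => PySem.List.sorted speakers (fun x => x) false

-- ===== PORT B =====
-- [item["speaker"] for item in result], with none for a KeyError
def collect_speakers (items : List (List (String × String))) : Option (List String) :=
  match items with
  | [] => some []
  | item :: rest =>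
    match lookup_speaker item, collect_speakers rest with
    | some sp, some t => some (sp :: t)
    | _, _ => none

-- the adjacency pass: append v only when it differs from the last appended value
def dedup_adj_go (prev : String) (l : List String) : List String :=
  match l with
  | [] => []
  | y :: ys => if y = prev then dedup_adj_go prev ys else y :: dedup_adj_go y ys

def dedup_adj (l : List String) : List String :=
  match l with
  | [] => []
  | x :: xs => x :: dedup_adj_go x xs

def extract_speakers_alt (result : List (List (String × String))) : List String :=
  match collect_speakers result with
  | none => []                                      -- unreachable under Pre_
  | some values => dedup_adj (PySem.List.sorted values (fun x => x) false)

-- ===== PRECONDITION & SPEC =====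
-- Pre_ excludes exactly the inputs where some item lacks a "speaker" key: Python A raises KeyError there.
def Pre_extract_speakers (result : List (List (String × String))) : Prop :=
  (result.all (fun item => item.any (fun kv => kv.1 == "speaker"))) = true
instance (result : List (List (String × String))) : Decidable (Pre_extract_speakers result) := by
  unfold Pre_extract_speakers; infer_instance

def pvWitness_extract_speakers : (List (List (String × String))) :=
  [[("speaker", "bob"), ("text", "hi")], [("speaker", "ann")], [("speaker", "bob")]]

def Spec_extract_speakers (result : List (List (String × String))) (out : List String) : Prop := out = extract_speakers_alt result
instance (result : List (List (String × String))) (out : List String) : Decidable (Spec_extract_speakers result out) := by unfold Spec_extract_speakers; infer_instance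

-- ===== CLAIM (what is proved, stated in full; the proofs are below) =====
def Claim_equal_extract_speakers : Prop := ∀ (result : List (List (String × String))), Dom_extract_speakers result → Pre_extract_speakers result → Spec_extract_speakers result (extract_speakers result)

-- ===== LEMMAS AND PROOFS =====

-- A's set-building step, as a fold step
def addNew (acc : List String) (sp : String) : List String :=
  if sp ∈ acc then acc else acc ++ [sp]

lemma lookup_speaker_isSome (item : List (String × String))
    (h : item.any (fun kv => kv.1 == "speaker") = true) :
    ∃ sp, lookup_speaker item = some sp := by
  induction item with
  | nil => simp at h
  | cons kv t ih =>
    simp only [List.any_cons, Bool.or_eq_true, beq_iff_eq] at h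
    by_cases hk : kv.1 = "speaker"
    · exact ⟨kv.2, by simp [lookup_speaker, hk]⟩
    · obtain ⟨sp, hsp⟩ := ih (by tauto)
      exact ⟨sp, by simpa [lookup_speaker, hk] using hsp⟩

lemma collect_isSome_of_pre (result : List (List (String × String)))
    (h : Pre_extract_speakers result) : ∃ l, collect_speakers result = some l := by
  induction result with
  | nil => exact ⟨[], rfl⟩
  | cons item rest ih =>
    unfold Pre_extract_speakers at h
    simp only [List.all_cons, Bool.and_eq_true] at h
    obtain ⟨l, hl⟩ := ih h.2
    obtain ⟨sp, hsp⟩ := lookup_speaker_isSome item h.1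
    exact ⟨sp :: l, by simp [collect_speakers, hsp, hl]⟩

lemma go_eq_foldl (items : List (List (String × String))) (l : List String)
    (h : collect_speakers items = some l) (acc : List String) :
    extract_speakers_go items acc = some (l.foldl addNew acc) := by
  induction items generalizing l acc with
  | nil =>
    simp only [collect_speakers, Option.some.injEq] at h
    subst h
    simp [extract_speakers_go]
  | cons item rest ih =>
    simp only [collect_speakers] at h
    cases hsp : lookup_speaker item with
    | none => simp [hsp] at h
    | some sp =>
      cases hct : collect_speakers rest with
      | none => simp [hsp, hct] at h
      | some t =>
        simp [hsp, hct] at h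
        subst h
        simp [extract_speakers_go, hsp, addNew, ih t hct]

lemma mem_foldl_addNew (xs : List String) (acc : List String) (x : String) :
    x ∈ xs.foldl addNew acc ↔ x ∈ acc ∨ x ∈ xs := by
  induction xs generalizing acc with
  | nil => simp
  | cons y ys ih =>
    simp only [List.foldl_cons, ih, addNew]
    split_ifs with hy
    · constructor
      · rintro (h | h)
        · exact Or.inl h
        · exact Or.inr (List.mem_cons_of_mem _ h)
      · rintro (h | h)
        · exact Or.inl h
        · rcases List.mem_cons.mp h with rfl | h
          · exact Or.inl hy
          · exact Or.inr h
    · simp only [List.mem_append, List.mem_cons]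
      tauto

lemma nodup_foldl_addNew (xs : List String) (acc : List String) (h : acc.Nodup) :
    (xs.foldl addNew acc).Nodup := by
  induction xs generalizing acc with
  | nil => exact h
  | cons y ys ih =>
    simp only [List.foldl_cons, addNew]
    split_ifs with hy
    · exact ih acc h
    · refine ih _ ?_
      rw [List.nodup_append]
      refine ⟨h, List.nodup_singleton y, ?_⟩
      intro a ha b hb
      rw [List.mem_singleton] at hb
      subst hb
      exact fun hab => hy (hab ▸ ha)

lemma mem_dedup_adj_go (prev : String) (l : List String) (x : String) :
    x ∈ dedup_adj_go prev l → x ∈ l := by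
  induction l generalizing prev with
  | nil => simp [dedup_adj_go]
  | cons y ys ih =>
    simp only [dedup_adj_go]
    split_ifs with hy
    · exact fun h => List.mem_cons_of_mem _ (ih prev h)
    · intro h
      rcases List.mem_cons.mp h with rfl | h
      · exact List.mem_cons_self
      · exact List.mem_cons_of_mem _ (ih y h)

lemma mem_dedup_adj_go' (prev : String) (l : List String) (x : String) (hx : x ∈ l) :
    x ∈ dedup_adj_go prev l ∨ x = prev := by
  induction l generalizing prev with
  | nil => simp at hx
  | cons y ys ih =>
    simp only [dedup_adj_go]
    split_ifs with hy
    · rcases List.mem_cons.mp hx with rfl | hx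
      · exact Or.inr hy
      · exact ih prev hx
    · rcases List.mem_cons.mp hx with rfl | hx
      · exact Or.inl List.mem_cons_self
      · rcases ih y hx with h | rfl
        · exact Or.inl (List.mem_cons_of_mem _ h)
        · exact Or.inl List.mem_cons_self

lemma dedup_adj_go_sorted (prev : String) (l : List String)
    (hle : ∀ x ∈ l, prev ≤ x) (hp : l.Pairwise (· ≤ ·)) :
    (dedup_adj_go prev l).Pairwise (· < ·) ∧ ∀ x ∈ dedup_adj_go prev l, prev < x := by
  induction l generalizing prev with
  | nil => simp [dedup_adj_go]
  | cons y ys ih =>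
    rcases List.pairwise_cons.mp hp with ⟨hy, hys⟩
    simp only [dedup_adj_go]
    split_ifs with hyp
    · subst hyp
      exact ih y (fun x hx => hy x hx) hys
    · have hprevy : prev < y := lt_of_le_of_ne (hle y List.mem_cons_self) (Ne.symm hyp)
      obtain ⟨h1, h2⟩ := ih y (fun x hx => hy x hx) hys
      refine ⟨List.pairwise_cons.mpr ⟨fun x hx => h2 x hx, h1⟩, ?_⟩
      intro x hx
      rcases List.mem_cons.mp hx with rfl | hx
      · exact hprevy
      · exact lt_trans hprevy (h2 x hx)

lemma dedup_adj_sorted_spec (values : List String) :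
    let s := PySem.List.sorted values (fun x => x) false
    (dedup_adj s).Pairwise (· < ·) ∧ ∀ x, x ∈ dedup_adj s ↔ x ∈ values := by
  intro s
  have hp : s.Pairwise (· ≤ ·) := PySem.List.sorted_pairwise values (fun x => x)
  have hmem : ∀ x, x ∈ s ↔ x ∈ values := fun x => PySem.List.mem_sorted values (fun x => x) false x
  cases hs : s with
  | nil =>
    constructor
    · simp [dedup_adj]
    · intro x
      simp [dedup_adj, ← hmem x, hs]
  | cons m t =>
    rw [hs] at hp
    rcases List.pairwise_cons.mp hp with ⟨hm, ht⟩
    obtain ⟨h1, h2⟩ := dedup_adj_go_sorted m t hm ht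
    constructor
    · exact List.pairwise_cons.mpr ⟨fun x hx => h2 x hx, h1⟩
    · intro x
      rw [← hmem x, hs]
      simp only [dedup_adj, List.mem_cons]
      constructor
      · rintro (rfl | h)
        · exact Or.inl rfl
        · exact Or.inr (mem_dedup_adj_go m t x h)
      · rintro (rfl | h)
        · exact Or.inl rfl
        · rcases mem_dedup_adj_go' m t x h with h | rfl
          · exact Or.inr h
          · exact Or.inl rfl

-- ===== VERDICT (by name: the statement is the Claim_ definition above) =====
theorem extract_speakers_spec : Claim_equal_extract_speakers := by
  intro result _ hpre
  unfold Spec_extract_speakers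
  obtain ⟨values, hcol⟩ := collect_isSome_of_pre result hpre
  unfold extract_speakers extract_speakers_alt
  rw [hcol, go_eq_foldl result values hcol []]
  obtain ⟨hsorted, hmem⟩ := dedup_adj_sorted_spec values
  have hnd : (dedup_adj (PySem.List.sorted values (fun x => x) false)).Nodup :=
    hsorted.imp ne_of_lt
  show PySem.List.sorted (List.foldl addNew [] values) (fun x => x) false =
      dedup_adj (PySem.List.sorted values (fun x => x) false)
  have hperm :
      (dedup_adj (PySem.List.sorted values (fun x => x) false)).Perm
        (values.foldl addNew []) := by
    rw [List.perm_ext_iff_of_nodup hnd (nodup_foldl_addNew values [] List.nodup_nil)]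
    intro x
    rw [hmem x, mem_foldl_addNew]
    simp
  exact PySem.List.sorted_eq_of_perm_of_pairwise_lt _ _ _ hperm hsorted
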